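-- pv_equiv track=rewrite | github.com/Dealer-09/Cytrox | cli/services.py | strip_reposhield_blocks
-- ===== SOURCE A (Python) =====
-- def strip_reposhield_blocks(content: str) -> str:
--     """
--     Removes RepoShield function blocks from PowerShell profile content.
--     Uses line-by-line parsing instead of regex to avoid ReDoS risks.
--     """
--     lines = content.splitlines(keepends=True)
--     result = []
--     skip_depth = 0
--     in_reposhield_block = False
--
--     for line in lines:
--         stripped = line.strip()
--
--         # Detect start of a RepoShield block
--         if stripped.startswith("# RepoShield"):
--             in_reposhield_block = True
--             continue
--
--         if in_reposhield_block:
--             # Track brace depth to know when the function ends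
--             skip_depth += stripped.count("{") - stripped.count("}")
--             if skip_depth <= 0 and "{" not in stripped and "}" not in stripped and stripped == "":
--                 # Blank line after block end — stop skipping
--                 in_reposhield_block = False
--                 skip_depth = 0
--             elif skip_depth <= 0 and "}" in stripped:
--                 # The closing brace of the function
--                 in_reposhield_block = False
--                 skip_depth = 0
--             continue
--
--         result.append(line)
--
--     return "".join(result)
-- ===== SOURCE B (Python) =====
-- def strip_reposhield_blocks(content: str) -> str:
--     """
--     Removes RepoShield function blocks from PowerShell profile content.
--     Staged approach: first compute the index spans [start, stop) occupied by
--     RepoShield blocks, then join the slices of lines between those spans.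
--     """
--     lines = content.splitlines(keepends=True)
--     n = len(lines)
--
--     def block_stop(i):
--         """Index just past the block whose '# RepoShield' header is at i."""
--         depth = 0
--         j = i + 1
--         while j < n:
--             s = lines[j].strip()
--             j += 1
--             if s.startswith("# RepoShield"):
--                 continue
--             depth += s.count("{") - s.count("}")
--             if depth <= 0 and ("}" in s or s == ""):
--                 break
--         return j
--
--     # Stage 1: collect the spans occupied by RepoShield blocks.
--     spans = []
--     i = 0
--     while i < n:
--         if lines[i].strip().startswith("# RepoShield"):
--             stop = block_stop(i)
--             spans.append((i, stop))
--             i = stop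
--         else:
--             i += 1
--
--     # Stage 2: join the slices between consecutive spans.
--     pieces = []
--     prev = 0
--     for start, stop in spans:
--         pieces.append("".join(lines[prev:start]))
--         prev = stop
--     pieces.append("".join(lines[prev:]))
--     return "".join(pieces)
-- ===== Notes on version B (the rewrite author's own statement) =====
-- stated objective: alternative
-- what changed: B is staged: a first pass computes the list of index spans [start, stop) occupied by RepoShield blocks, and a second pass joins the line slices lying between consecutive spans, instead of A's single per-line pass carrying skip_depth/in_block state and appending line by line.
import Mathlib
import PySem

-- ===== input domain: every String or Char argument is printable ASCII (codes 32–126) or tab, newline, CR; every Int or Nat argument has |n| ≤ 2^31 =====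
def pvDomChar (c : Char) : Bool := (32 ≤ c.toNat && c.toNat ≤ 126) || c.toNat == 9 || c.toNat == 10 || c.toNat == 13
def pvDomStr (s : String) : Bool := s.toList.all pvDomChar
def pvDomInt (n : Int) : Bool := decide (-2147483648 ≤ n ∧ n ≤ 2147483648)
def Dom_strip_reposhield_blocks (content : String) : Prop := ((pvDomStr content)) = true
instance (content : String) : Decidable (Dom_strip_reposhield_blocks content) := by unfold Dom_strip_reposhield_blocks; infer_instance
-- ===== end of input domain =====

-- B stages the work: first compute the index spans occupied by RepoShield blocks, then join
-- the line slices between consecutive spans (objective: alternative decomposition, same cost).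

-- str.splitlines(keepends=True), ported by hand (PySem has only the keepends=False form);
-- exact on Dom (printable ASCII + tab/LF/CR: the only line breaks occurring are \n, \r, \r\n).
def pvSplitKeep : List Char → List Char → List (List Char)
  | cur, [] => if cur = [] then [] else [cur.reverse]
  | cur, '\r' :: '\n' :: rest => ('\n' :: '\r' :: cur).reverse :: pvSplitKeep [] rest
  | cur, '\r' :: rest => ('\r' :: cur).reverse :: pvSplitKeep [] rest
  | cur, '\n' :: rest => ('\n' :: cur).reverse :: pvSplitKeep [] rest
  | cur, c :: rest => pvSplitKeep (c :: cur) rest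

def pvMarker : List Char := "# RepoShield".toList

-- ===== PORT A =====
-- one step of A's for-loop; state = (result, skip_depth, in_reposhield_block)
def pvAStep : (List (List Char) × Int × Bool) → List Char → (List (List Char) × Int × Bool)
  | (result, skip_depth, in_block), line =>
    let stripped := PySem.Chars.strip line
    if PySem.Chars.startswith stripped pvMarker then
      (result, skip_depth, true)
    else if in_block then
      let d := skip_depth + (PySem.Chars.count stripped ['{'] : Int) - (PySem.Chars.count stripped ['}'] : Int)
      if d ≤ 0 ∧ PySem.Chars.isIn ['{'] stripped = false ∧ PySem.Chars.isIn ['}'] stripped = false ∧ stripped = [] then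
        (result, 0, false)
      else if d ≤ 0 ∧ PySem.Chars.isIn ['}'] stripped = true then
        (result, 0, false)
      else
        (result, d, true)
    else
      (result ++ [line], skip_depth, in_block)

def strip_reposhield_blocks (content : String) : String :=
  let lines := pvSplitKeep [] content.toList
  let fin := lines.foldl pvAStep ([], 0, false)
  String.ofList (PySem.Chars.join [] fin.1)

-- ===== PORT B =====
-- block_stop of Source B: index just past the block whose header is at i (called with j = i+1);
-- fuel only totalizes the while loop (j grows each step, so fuel = lines.length is enough)
def pvBlockStop (lines : List (List Char)) : Nat → Int → Nat → Nat
  | 0, _, j => j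
  | fuel+1, depth, j =>
    if j < lines.length then
      let s := PySem.Chars.strip (lines.getD j [])
      if PySem.Chars.startswith s pvMarker then pvBlockStop lines fuel depth (j+1)
      else
        let d := depth + (PySem.Chars.count s ['{'] : Int) - (PySem.Chars.count s ['}'] : Int)
        if d ≤ 0 ∧ (PySem.Chars.isIn ['}'] s = true ∨ s = []) then j + 1
        else pvBlockStop lines fuel d (j+1)
    else j

-- stage 1 of Source B: the spans [start, stop) occupied by RepoShield blocks;
-- fuel only totalizes the while loop (i grows each step, so fuel = lines.length + 1 is enough)
def pvSpans (lines : List (List Char)) : Nat → Nat → List (Nat × Nat)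
  | 0, _ => []
  | fuel+1, i =>
    if i < lines.length then
      if PySem.Chars.startswith (PySem.Chars.strip (lines.getD i [])) pvMarker then
        (i, pvBlockStop lines lines.length 0 (i+1)) :: pvSpans lines fuel (pvBlockStop lines lines.length 0 (i+1))
      else pvSpans lines fuel (i+1)
    else []

-- stage 2 of Source B: join the slices between consecutive spans
def pvCut (lines : List (List Char)) : List (Nat × Nat) → Nat → List (List Char)
  | [], prev => lines.drop prev
  | (start, stop) :: rest, prev => (lines.drop prev).take (start - prev) ++ pvCut lines rest stop

def strip_reposhield_blocks_alt (content : String) : String :=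
  let lines := pvSplitKeep [] content.toList
  String.ofList (PySem.Chars.join [] (pvCut lines (pvSpans lines (lines.length + 1) 0) 0))

-- ===== PRECONDITION & SPEC =====
def Spec_strip_reposhield_blocks (content : String) (out : String) : Prop := out = strip_reposhield_blocks_alt content
instance (content : String) (out : String) : Decidable (Spec_strip_reposhield_blocks content out) := by unfold Spec_strip_reposhield_blocks; infer_instance

-- ===== CLAIM (what is proved, stated in full; the proofs are below) =====
def Claim_equal_strip_reposhield_blocks : Prop := ∀ (content : String), Dom_strip_reposhield_blocks content → Spec_strip_reposhield_blocks content (strip_reposhield_blocks content)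

-- ===== LEMMAS AND PROOFS =====

-- proof-only list-level model of skipping one block (mirrors A's in-block branch)
def pvEnd (depth : Int) : List (List Char) → List (List Char)
  | [] => []
  | line :: rest =>
    let s := PySem.Chars.strip line
    if PySem.Chars.startswith s pvMarker then pvEnd depth rest
    else
      let d := depth + (PySem.Chars.count s ['{'] : Int) - (PySem.Chars.count s ['}'] : Int)
      if d ≤ 0 ∧ (PySem.Chars.isIn ['}'] s = true ∨ s = []) then rest
      else pvEnd d rest

theorem pvEnd_length_le (l : List (List Char)) : ∀ (depth : Int), (pvEnd depth l).length ≤ l.length := by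
  induction l with
  | nil => intro depth; simp [pvEnd]
  | cons line rest ih =>
    intro depth
    simp only [pvEnd]
    split_ifs with h1 h2
    · exact le_trans (ih depth) (by simp)
    · simp
    · exact le_trans (ih _) (by simp)

def pvHdr (l : List Char) : Bool := PySem.Chars.startswith (PySem.Chars.strip l) pvMarker

-- proof-only list-level model of the whole function
def pvOuter : List (List Char) → List (List Char)
  | [] => []
  | line :: rest =>
    if pvHdr line then pvOuter (pvEnd 0 rest) else line :: pvOuter rest
termination_by l => l.length
decreasing_by
  · have := pvEnd_length_le rest 0; simp; omega
  · simp

theorem pvOuter_nil : pvOuter [] = [] := by rw [pvOuter.eq_def]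

theorem pvOuter_cons (l : List Char) (rest : List (List Char)) :
    pvOuter (l :: rest) = if pvHdr l then pvOuter (pvEnd 0 rest) else l :: pvOuter rest := by
  rw [pvOuter.eq_def]

-- A's fold equals the list-level model
theorem pvLoop_eq (lines : List (List Char)) :
    (∀ (acc : List (List Char)) (d : Int),
        (lines.foldl pvAStep (acc, d, true)).1 = acc ++ pvOuter (pvEnd d lines))
    ∧ (∀ (acc : List (List Char)),
        (lines.foldl pvAStep (acc, 0, false)).1 = acc ++ pvOuter lines) := by
  induction lines with
  | nil => simp [pvEnd, pvOuter_nil]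
  | cons line rest ih =>
    constructor
    · intro acc d
      by_cases hm : PySem.Chars.startswith (PySem.Chars.strip line) pvMarker = true
      · simp only [List.foldl_cons, pvAStep, pvEnd, hm, if_pos]
        exact ih.1 acc d
      · simp only [List.foldl_cons, pvAStep, pvEnd, hm, Bool.false_eq_true, if_false]
        set s := PySem.Chars.strip line with hs
        set d' := d + (PySem.Chars.count s ['{'] : Int) - (PySem.Chars.count s ['}'] : Int) with hd'
        by_cases h1 : d' ≤ 0 ∧ PySem.Chars.isIn ['{'] s = false ∧ PySem.Chars.isIn ['}'] s = false ∧ s = []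
        · have hcond : d' ≤ 0 ∧ (PySem.Chars.isIn ['}'] s = true ∨ s = []) := ⟨h1.1, Or.inr h1.2.2.2⟩
          rw [if_pos h1, if_pos hcond]
          exact ih.2 acc
        · by_cases h2 : d' ≤ 0 ∧ PySem.Chars.isIn ['}'] s = true
          · have hcond : d' ≤ 0 ∧ (PySem.Chars.isIn ['}'] s = true ∨ s = []) := ⟨h2.1, Or.inl h2.2⟩
            rw [if_neg h1, if_pos h2, if_pos hcond]
            exact ih.2 acc
          · have hcond : ¬ (d' ≤ 0 ∧ (PySem.Chars.isIn ['}'] s = true ∨ s = [])) := by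
              rintro ⟨hle, hor⟩
              rcases hor with hbr | hnil
              · exact h2 ⟨hle, hbr⟩
              · have he1 : PySem.Chars.isIn ['{'] s = false := by rw [hnil]; decide
                have he2 : PySem.Chars.isIn ['}'] s = false := by rw [hnil]; decide
                exact h1 ⟨hle, he1, he2, hnil⟩
            rw [if_neg h1, if_neg h2, if_neg hcond]
            exact ih.1 acc d'
    · intro acc
      by_cases hm : pvHdr line = true
      · simp only [List.foldl_cons, pvAStep]
        rw [if_pos (show PySem.Chars.startswith (PySem.Chars.strip line) pvMarker = true by simpa [pvHdr] using hm)]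
        rw [pvOuter_cons, if_pos hm]
        exact ih.1 acc 0
      · simp only [List.foldl_cons, pvAStep]
        rw [if_neg (show ¬ PySem.Chars.startswith (PySem.Chars.strip line) pvMarker = true by simpa [pvHdr] using hm)]
        rw [if_neg (by simp)]
        rw [pvOuter_cons, if_neg hm, ih.2 (acc ++ [line]), List.append_assoc]
        rfl

-- drop as a cons, packaged for the index-based lemmas
theorem pvDrop_cons (lines : List (List Char)) (i : Nat) (h : i < lines.length) :
    lines.drop i = lines.getD i [] :: lines.drop (i+1) := by
  rw [List.drop_eq_getElem_cons h, List.getD_eq_getElem lines [] h]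

-- block_stop never moves the index backwards
theorem pvBlockStop_ge (lines : List (List Char)) :
    ∀ (fuel : Nat) (depth : Int) (j : Nat), j ≤ pvBlockStop lines fuel depth j := by
  intro fuel
  induction fuel with
  | zero => intro depth j; simp [pvBlockStop]
  | succ fuel ih =>
    intro depth j
    simp only [pvBlockStop]
    split_ifs with h h1 h2
    · exact le_trans (by omega) (ih depth (j+1))
    · omega
    · exact le_trans (by omega) (ih _ (j+1))
    · exact le_refl j

-- pvBlockStop computes the drop index of pvEnd (with enough fuel)
theorem pvBlockStop_drop (lines : List (List Char)) :
    ∀ (fuel : Nat) (depth : Int) (j : Nat), lines.length - j ≤ fuel →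
      pvEnd depth (lines.drop j) = lines.drop (pvBlockStop lines fuel depth j) := by
  intro fuel
  induction fuel with
  | zero =>
    intro depth j hk
    rw [List.drop_eq_nil_of_le (show lines.length ≤ j by omega)]
    simp only [pvBlockStop, pvEnd]
    rw [List.drop_eq_nil_of_le (show lines.length ≤ j by omega)]
  | succ fuel ih =>
    intro depth j hk
    by_cases h : j < lines.length
    · rw [pvDrop_cons lines j h]
      simp only [pvBlockStop, if_pos h]
      simp only [pvEnd]
      split_ifs with h1 h2
      · exact ih depth (j+1) (by omega)
      · rfl
      · exact ih _ (j+1) (by omega)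
    · simp only [pvBlockStop, if_neg h]
      rw [List.drop_eq_nil_of_le (by omega)]
      simp [pvEnd]

-- every span produced from index i starts at or after i
theorem pvSpans_start_ge (lines : List (List Char)) :
    ∀ (fuel : Nat) (i : Nat), ∀ p ∈ pvSpans lines fuel i, i ≤ p.1 := by
  intro fuel
  induction fuel with
  | zero => intro i p hp; simp [pvSpans] at hp
  | succ fuel ih =>
    intro i p hp
    by_cases h : i < lines.length
    · rw [pvSpans, if_pos h] at hp
      split_ifs at hp with hm
      · rcases List.mem_cons.1 hp with rfl | hp'
        · exact le_refl _
        · have hge := pvBlockStop_ge lines lines.length 0 (i+1)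
          have := ih (pvBlockStop lines lines.length 0 (i+1)) p hp'
          omega
      · have := ih (i+1) p hp
        omega
    · rw [pvSpans, if_neg h] at hp
      simp at hp

-- skipping a non-span line commutes with pvCut when all spans start later
theorem pvCut_shift (lines : List (List Char)) (spans : List (Nat × Nat)) (i : Nat)
    (hi : i < lines.length) (hs : ∀ p ∈ spans, i + 1 ≤ p.1) :
    pvCut lines spans i = lines.getD i [] :: pvCut lines spans (i+1) := by
  cases spans with
  | nil =>
    simp only [pvCut]
    exact pvDrop_cons lines i hi
  | cons p rest =>
    obtain ⟨start, stop⟩ := p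
    have hge : i + 1 ≤ start := hs (start, stop) (by simp)
    simp only [pvCut]
    rw [pvDrop_cons lines i hi]
    have h1 : start - i = (start - (i+1)) + 1 := by omega
    rw [h1, List.take_succ_cons, List.cons_append]

-- B's staged computation equals the list-level model on every suffix (with enough fuel)
theorem pvCut_spans (lines : List (List Char)) :
    ∀ (fuel : Nat) (i : Nat), lines.length - i < fuel →
      pvCut lines (pvSpans lines fuel i) i = pvOuter (lines.drop i) := by
  intro fuel
  induction fuel with
  | zero => intro i hk; omega
  | succ fuel ih =>
    intro i hk
    by_cases h : i < lines.length
    · rw [pvSpans, if_pos h]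
      by_cases hm : PySem.Chars.startswith (PySem.Chars.strip (lines.getD i [])) pvMarker = true
      · rw [if_pos hm]
        have hge := pvBlockStop_ge lines lines.length 0 (i+1)
        simp only [pvCut, Nat.sub_self, List.take_zero, List.nil_append]
        rw [ih (pvBlockStop lines lines.length 0 (i+1)) (by omega)]
        rw [pvDrop_cons lines i h, pvOuter_cons, if_pos (show pvHdr (lines.getD i []) = true by simpa [pvHdr] using hm)]
        rw [pvBlockStop_drop lines (lines.length) 0 (i+1) (by omega)]
      · rw [if_neg hm]
        rw [pvCut_shift lines (pvSpans lines fuel (i+1)) i h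
          (fun p hp => pvSpans_start_ge lines fuel (i+1) p hp)]
        rw [ih (i+1) (by omega)]
        rw [pvDrop_cons lines i h, pvOuter_cons, if_neg (show ¬ pvHdr (lines.getD i []) = true by simpa [pvHdr] using hm)]
    · rw [pvSpans, if_neg h, List.drop_eq_nil_of_le (by omega)]
      simp only [pvCut, pvOuter_nil, List.drop_eq_nil_of_le (show lines.length ≤ i by omega)]

-- ===== VERDICT (by name: the statement is the Claim_ definition above) =====
theorem strip_reposhield_blocks_spec : Claim_equal_strip_reposhield_blocks := by
  intro content _
  unfold Spec_strip_reposhield_blocks strip_reposhield_blocks strip_reposhield_blocks_alt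
  show String.ofList (PySem.Chars.join [] ((List.foldl pvAStep ([], 0, false) (pvSplitKeep [] content.toList)).1))
      = String.ofList (PySem.Chars.join [] (pvCut (pvSplitKeep [] content.toList) (pvSpans (pvSplitKeep [] content.toList) ((pvSplitKeep [] content.toList).length + 1) 0) 0))
  rw [(pvLoop_eq (pvSplitKeep [] content.toList)).2 []]
  rw [pvCut_spans (pvSplitKeep [] content.toList) ((pvSplitKeep [] content.toList).length + 1) 0 (by omega), List.drop_zero]
  rfl
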